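-- pv_equiv track=rewrite | github.com/VladTatarov/TIC_Tatarov_529A | LessCompressionJPEG/lesscompression_jpeg.py | zigzag_points
-- ===== SOURCE A (Python) =====
-- def zigzag_points(rows, cols):
--     # Define constants for directions
--     UP, DOWN, RIGHT, LEFT, UP_RIGHT, DOWN_LEFT = range(6)
--
--     # Move point in different directions
--     def move(direction, current_points):
--         return {
--             UP: lambda p: (p[0] - 1, p[1]),
--             DOWN: lambda p: (p[0] + 1, p[1]),
--             LEFT: lambda p: (p[0], p[1] - 1),
--             RIGHT: lambda p: (p[0], p[1] + 1),
--             UP_RIGHT: lambda p: move(UP, move(RIGHT, p)),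
--             DOWN_LEFT: lambda p: move(DOWN, move(LEFT, p))
--         }[direction](current_points)
--
--     # Check if point is within block bounds
--     def inbounds(current_points):
--         return 0 <= current_points[0] < rows and 0 <= current_points[1] < cols
--
--     # Initialize starting point at top-left cell
--     current_point = (0, 0)
--     move_up = True
--     for _ in range(rows * cols):
--         yield current_point
--         if move_up:
--             if inbounds(move(UP_RIGHT, current_point)):
--                 current_point = move(UP_RIGHT, current_point)
--             else:
--                 move_up = False
--                 if inbounds(move(RIGHT, current_point)):
--                     current_point = move(RIGHT, current_point)
--                 else:
--                     current_point = move(DOWN, current_point)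
--         else:
--             if inbounds(move(DOWN_LEFT, current_point)):
--                 current_point = move(DOWN_LEFT, current_point)
--             else:
--                 move_up = True
--                 if inbounds(move(DOWN, current_point)):
--                     current_point = move(DOWN, current_point)
--                 else:
--                     current_point = move(RIGHT, current_point)
-- ===== SOURCE B (Python) =====
-- def zigzag_points(rows, cols):
--     # Closed-form diagonal enumeration: diagonal s = r+c, even s walks r downward, odd s upward.
--     if rows <= 0 or cols <= 0:
--         return
--     for s in range(rows + cols - 1):
--         lo = max(0, s - cols + 1)
--         hi = min(s, rows - 1)
--         rs = range(hi, lo - 1, -1) if s % 2 == 0 else range(lo, hi + 1)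
--         for r in rs:
--             yield (r, s - r)
-- ===== Notes on version B (the rewrite author's own statement) =====
-- stated objective: simpler
-- what changed: Replaced A's stateful zigzag walk (direction flag plus bounds-probing moves) by a closed-form enumeration of the diagonals r+c=s, yielding each diagonal's clipped r-range downward for even s and upward for odd s.
-- intended difference: When rows < 0 and cols < 0, A's loop runs rows*cols > 0 times and yields a staircase of points that lie outside the grid; B yields nothing, the intended output for a grid with no cells. — e.g. on zigzag_points(-1, -1): A returns [(0, 0)], B returns []
import Mathlib
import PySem

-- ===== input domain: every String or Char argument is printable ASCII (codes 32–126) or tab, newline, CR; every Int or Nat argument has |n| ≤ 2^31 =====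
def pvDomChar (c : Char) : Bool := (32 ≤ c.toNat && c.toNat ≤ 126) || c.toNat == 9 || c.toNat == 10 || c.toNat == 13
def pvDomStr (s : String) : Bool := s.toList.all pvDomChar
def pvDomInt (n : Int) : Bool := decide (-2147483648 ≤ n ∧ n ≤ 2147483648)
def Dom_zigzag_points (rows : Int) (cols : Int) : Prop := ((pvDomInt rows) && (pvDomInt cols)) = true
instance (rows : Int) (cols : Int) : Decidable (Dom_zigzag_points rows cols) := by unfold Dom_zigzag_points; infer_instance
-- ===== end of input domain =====

-- B replaces A's direction state machine by a closed-form enumeration of the diagonals r+c = s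
-- (objective: simpler). Both Pythons are generators; equivalence is about the list of yielded points.

-- ===== PORT A =====
-- move(direction, p): directions UP=0, DOWN=1, RIGHT=2, LEFT=3, UP_RIGHT=4, DOWN_LEFT=5
-- the four primitive direction lambdas
def zzMove1 : Nat → Int × Int → Int × Int
  | 0, p => (p.1 - 1, p.2)
  | 1, p => (p.1 + 1, p.2)
  | 2, p => (p.1, p.2 + 1)
  | _, p => (p.1, p.2 - 1)
-- the composite entries UP_RIGHT / DOWN_LEFT call move on the primitive directions
def zzMove : Nat → Int × Int → Int × Int
  | 4, p => zzMove1 0 (zzMove1 2 p)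
  | 5, p => zzMove1 1 (zzMove1 3 p)
  | d, p => zzMove1 d p

-- inbounds(p)
def zzInb (rows cols : Int) (p : Int × Int) : Bool :=
  decide (0 ≤ p.1 ∧ p.1 < rows ∧ 0 ≤ p.2 ∧ p.2 < cols)

-- the 'for _ in range(rows*cols)' loop: fuel = remaining iterations, state = (current_point, move_up)
def zzLoop (rows cols : Int) : Nat → Int × Int → Bool → List (Int × Int)
  | 0, _, _ => []
  | n+1, p, up =>
    p ::
      (if up then
        if zzInb rows cols (zzMove 4 p) then zzLoop rows cols n (zzMove 4 p) true
        else if zzInb rows cols (zzMove 2 p) then zzLoop rows cols n (zzMove 2 p) false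
        else zzLoop rows cols n (zzMove 1 p) false
      else
        if zzInb rows cols (zzMove 5 p) then zzLoop rows cols n (zzMove 5 p) false
        else if zzInb rows cols (zzMove 1 p) then zzLoop rows cols n (zzMove 1 p) true
        else zzLoop rows cols n (zzMove 2 p) true)

def zigzag_points (rows : Int) (cols : Int) : List (Int × Int) :=
  zzLoop rows cols (rows * cols).toNat (0, 0) true

-- ===== PORT B =====
-- the points yielded for one diagonal s (the inner 'for r in rs' loop)
def zzDiag (rows cols s : Int) : List (Int × Int) :=
  let lo := max 0 (s - cols + 1)
  let hi := min s (rows - 1)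
  let rs := if PySem.Int.mod s 2 = 0 then PySem.List.pyRange hi (lo - 1) (-1)
            else PySem.List.pyRange lo (hi + 1) 1
  rs.map (fun r => (r, s - r))

def zigzag_points_alt (rows : Int) (cols : Int) : List (Int × Int) :=
  if rows ≤ 0 ∨ cols ≤ 0 then []
  else (PySem.List.pyRange 0 (rows + cols - 1) 1).foldl (fun acc s => acc ++ zzDiag rows cols s) []

-- ===== PRECONDITION & SPEC =====
-- When rows < 0 and cols < 0, A's loop runs rows*cols > 0 times and yields a staircase of
-- points that lie outside the grid; B yields nothing, the intended output for a grid with no cells.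
def D_zigzag_points (rows : Int) (cols : Int) : Prop := rows < 0 ∧ cols < 0
instance (rows : Int) (cols : Int) : Decidable (D_zigzag_points rows cols) := by unfold D_zigzag_points; infer_instance

def Spec_zigzag_points (rows : Int) (cols : Int) (out : List (Int × Int)) : Prop :=
  ¬ D_zigzag_points rows cols → out = zigzag_points_alt rows cols
instance (rows : Int) (cols : Int) (out : List (Int × Int)) : Decidable (Spec_zigzag_points rows cols out) := by unfold Spec_zigzag_points; infer_instance

def pvDiffWitness_zigzag_points : Int × Int := (-1, -1)
def pvDiffWitnessOut_zigzag_points : (List (Int × Int)) × (List (Int × Int)) := ([(0, 0)], [])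

-- ===== CLAIM (what is proved, stated in full; the proofs are below) =====
def Claim_unchanged_zigzag_points : Prop := ∀ (rows : Int) (cols : Int), Dom_zigzag_points rows cols → Spec_zigzag_points rows cols (zigzag_points rows cols)
def Claim_changed_zigzag_points : Prop := Dom_zigzag_points (pvDiffWitness_zigzag_points.1) (pvDiffWitness_zigzag_points.2) ∧ D_zigzag_points (pvDiffWitness_zigzag_points.1) (pvDiffWitness_zigzag_points.2) ∧ zigzag_points (pvDiffWitness_zigzag_points.1) (pvDiffWitness_zigzag_points.2) = pvDiffWitnessOut_zigzag_points.1 ∧ zigzag_points_alt (pvDiffWitness_zigzag_points.1) (pvDiffWitness_zigzag_points.2) = pvDiffWitnessOut_zigzag_points.2 ∧ pvDiffWitnessOut_zigzag_points.1 ≠ pvDiffWitnessOut_zigzag_points.2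
def Claim_exact_zigzag_points : Prop := ∀ (rows : Int) (cols : Int), Dom_zigzag_points rows cols → D_zigzag_points rows cols → zigzag_points rows cols ≠ zigzag_points_alt rows cols

-- ===== LEMMAS AND PROOFS =====

-- abbreviations for the endpoints of diagonal s
def zzLo (cols s : Int) : Int := max 0 (s - cols + 1)
def zzHi (rows s : Int) : Int := min s (rows - 1)

-- where A's walk stands right after finishing diagonal s upward / downward
def zzNextUp (cols s : Int) : Int × Int :=
  if s - zzLo cols s + 1 < cols then (zzLo cols s, s - zzLo cols s + 1)
  else (zzLo cols s + 1, s - zzLo cols s)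
def zzNextDown (rows s : Int) : Int × Int :=
  if zzHi rows s + 1 < rows then (zzHi rows s + 1, s - zzHi rows s)
  else (zzHi rows s, s - zzHi rows s + 1)

-- A's entry point into diagonal s
def zzEntry (rows cols s : Int) : Int × Int :=
  if s % 2 = 0 then (zzHi rows s, s - zzHi rows s) else (zzLo cols s, s - zzLo cols s)

-- B's output from diagonal s onward
def zzTail (rows cols s : Int) : List (Int × Int) :=
  (PySem.List.pyRange s (rows + cols - 1) 1).flatMap (zzDiag rows cols)

lemma zzUpRun (rows cols : Int) (hr : 1 ≤ rows) (hc : 1 ≤ cols) (s : Int)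
    (hs0 : 0 ≤ s) (hsS : s ≤ rows + cols - 2) :
    ∀ (j m : Nat) (r : Int), r = zzLo cols s + j → r ≤ zzHi rows s →
    zzLoop rows cols ((j + 1) + m) (r, s - r) true =
      (PySem.List.pyRange r (zzLo cols s - 1) (-1)).map (fun r => (r, s - r)) ++
        zzLoop rows cols m (zzNextUp cols s) false := by
  have hL0 : 0 ≤ zzLo cols s := le_max_left _ _
  have hLlb : s - cols + 1 ≤ zzLo cols s := le_max_right _ _
  have hLub : zzLo cols s = 0 ∨ zzLo cols s = s - cols + 1 := max_choice _ _
  have hH1 : zzHi rows s ≤ s := min_le_left _ _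
  have hH2 : zzHi rows s ≤ rows - 1 := min_le_right _ _
  have hHc : zzHi rows s = s ∨ zzHi rows s = rows - 1 := min_choice _ _
  intro j
  induction j with
  | zero =>
    intro m r hr' hrhi
    simp only [Nat.cast_zero, add_zero] at hr'
    subst hr'
    rw [show (0 + 1) + m = m + 1 from by omega]
    have h4 : zzInb rows cols (zzLo cols s - 1, s - zzLo cols s + 1) = false := by
      simp only [zzInb, decide_eq_false_iff_not, not_and, not_lt]
      intro _ _ _; omega
    rw [PySem.List.pyRange_neg_one_cons (by omega), PySem.List.pyRange_neg_one_eq_nil (by omega)]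
    by_cases hR : s - zzLo cols s + 1 < cols
    · have h2 : zzInb rows cols (zzLo cols s, s - zzLo cols s + 1) = true := by
        simp only [zzInb, decide_eq_true_eq]
        refine ⟨by omega, by omega, by omega, by omega⟩
      simp only [zzLoop, zzMove, zzMove1, h4, h2, Bool.false_eq_true, if_false, if_true,
        zzNextUp, if_pos hR, List.map_cons, List.map_nil, List.cons_append, List.nil_append]
    · have h2 : zzInb rows cols (zzLo cols s, s - zzLo cols s + 1) = false := by
        simp only [zzInb, decide_eq_false_iff_not, not_and, not_lt]
        intro _ _ _; omega
      simp only [zzLoop, zzMove, zzMove1, h4, h2, Bool.false_eq_true, if_false, if_true,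
        zzNextUp, if_neg hR, List.map_cons, List.map_nil, List.cons_append, List.nil_append]
  | succ j ih =>
    intro m r hr' hrhi
    push_cast at hr'
    rw [show (j + 1 + 1) + m = ((j + 1) + m) + 1 from by omega]
    have h4 : zzInb rows cols (r - 1, s - r + 1) = true := by
      simp only [zzInb, decide_eq_true_eq]
      refine ⟨by omega, by omega, by omega, by omega⟩
    have hco : s - r + 1 = s - (r - 1) := by ring
    simp only [zzLoop, zzMove, zzMove1, h4, if_true]
    rw [hco]
    rw [ih m (r - 1) (by omega) (by omega)]
    rw [show PySem.List.pyRange r (zzLo cols s - 1) (-1)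
          = r :: PySem.List.pyRange (r - 1) (zzLo cols s - 1) (-1)
        from PySem.List.pyRange_neg_one_cons (by omega)]
    simp only [List.map_cons, List.cons_append]

lemma zzDownRun (rows cols : Int) (hr : 1 ≤ rows) (hc : 1 ≤ cols) (s : Int)
    (hs0 : 0 ≤ s) (hsS : s ≤ rows + cols - 2) :
    ∀ (j m : Nat) (r : Int), r = zzHi rows s - j → zzLo cols s ≤ r →
    zzLoop rows cols ((j + 1) + m) (r, s - r) false =
      (PySem.List.pyRange r (zzHi rows s + 1) 1).map (fun r => (r, s - r)) ++
        zzLoop rows cols m (zzNextDown rows s) true := by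
  have hL0 : 0 ≤ zzLo cols s := le_max_left _ _
  have hLlb : s - cols + 1 ≤ zzLo cols s := le_max_right _ _
  have hLub : zzLo cols s = 0 ∨ zzLo cols s = s - cols + 1 := max_choice _ _
  have hH1 : zzHi rows s ≤ s := min_le_left _ _
  have hH2 : zzHi rows s ≤ rows - 1 := min_le_right _ _
  have hHc : zzHi rows s = s ∨ zzHi rows s = rows - 1 := min_choice _ _
  intro j
  induction j with
  | zero =>
    intro m r hr' hrlo
    simp only [Nat.cast_zero, sub_zero] at hr'
    subst hr'
    rw [show (0 + 1) + m = m + 1 from by omega]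
    have h5 : zzInb rows cols (zzHi rows s + 1, s - zzHi rows s - 1) = false := by
      simp only [zzInb, decide_eq_false_iff_not, not_and, not_lt]
      intro _ _ _; omega
    rw [PySem.List.pyRange_one_cons (by omega), PySem.List.pyRange_one_eq_nil (by omega)]
    by_cases hR : zzHi rows s + 1 < rows
    · have h1 : zzInb rows cols (zzHi rows s + 1, s - zzHi rows s) = true := by
        simp only [zzInb, decide_eq_true_eq]
        refine ⟨by omega, by omega, by omega, by omega⟩
      simp only [zzLoop, zzMove, zzMove1, h5, h1, Bool.false_eq_true, if_false, if_true,
        zzNextDown, if_pos hR, List.map_cons, List.map_nil, List.cons_append, List.nil_append]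
    · have h1 : zzInb rows cols (zzHi rows s + 1, s - zzHi rows s) = false := by
        simp only [zzInb, decide_eq_false_iff_not, not_and, not_lt]
        intro _ _ _; omega
      simp only [zzLoop, zzMove, zzMove1, h5, h1, Bool.false_eq_true, if_false, if_true,
        zzNextDown, if_neg hR, List.map_cons, List.map_nil, List.cons_append, List.nil_append]
  | succ j ih =>
    intro m r hr' hrlo
    push_cast at hr'
    rw [show (j + 1 + 1) + m = ((j + 1) + m) + 1 from by omega]
    have h5 : zzInb rows cols (r + 1, s - r - 1) = true := by
      simp only [zzInb, decide_eq_true_eq]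
      refine ⟨by omega, by omega, by omega, by omega⟩
    have hco : s - r - 1 = s - (r + 1) := by ring
    simp only [zzLoop, zzMove, zzMove1, h5, Bool.false_eq_true, if_false, if_true]
    rw [hco]
    rw [ih m (r + 1) (by omega) (by omega)]
    rw [show PySem.List.pyRange r (zzHi rows s + 1) 1
          = r :: PySem.List.pyRange (r + 1) (zzHi rows s + 1) 1
        from PySem.List.pyRange_one_cons (by omega)]
    simp only [List.map_cons, List.cons_append]

lemma zzDiagStep (rows cols : Int) (hr : 1 ≤ rows) (hc : 1 ≤ cols) (s : Int)
    (hs0 : 0 ≤ s) (hsS : s ≤ rows + cols - 2) (m : Nat) :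
    zzLoop rows cols ((zzDiag rows cols s).length + m) (zzEntry rows cols s) (decide (s % 2 = 0)) =
      zzDiag rows cols s ++
        (if s % 2 = 0 then zzLoop rows cols m (zzNextUp cols s) false
         else zzLoop rows cols m (zzNextDown rows s) true) := by
  have hmod : PySem.Int.mod s 2 = s % 2 := PySem.Int.mod_eq_emod_of_pos (by norm_num)
  have hLH : zzLo cols s ≤ zzHi rows s := by
    have := max_choice 0 (s - cols + 1); have := min_choice s (rows - 1)
    unfold zzLo zzHi at *; omega
  by_cases hpar : s % 2 = 0
  · have hd : zzDiag rows cols s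
        = (PySem.List.pyRange (zzHi rows s) (zzLo cols s - 1) (-1)).map (fun r => (r, s - r)) := by
      unfold zzDiag zzLo zzHi
      simp only [hmod, hpar, if_pos, reduceIte]
    have hlen : (zzDiag rows cols s).length = ((zzHi rows s - zzLo cols s).toNat + 1) := by
      rw [hd, List.length_map, PySem.List.length_pyRange_neg_one]; omega
    rw [hlen, hd, decide_eq_true hpar]
    have he : zzEntry rows cols s = (zzHi rows s, s - zzHi rows s) := by
      unfold zzEntry; rw [if_pos hpar]
    rw [he, if_pos hpar]
    exact zzUpRun rows cols hr hc s hs0 hsS _ m _ (by omega) le_rfl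
  · have hd : zzDiag rows cols s
        = (PySem.List.pyRange (zzLo cols s) (zzHi rows s + 1) 1).map (fun r => (r, s - r)) := by
      unfold zzDiag zzLo zzHi
      simp only [hmod, if_neg hpar]
    have hlen : (zzDiag rows cols s).length = ((zzHi rows s - zzLo cols s).toNat + 1) := by
      rw [hd, List.length_map, PySem.List.length_pyRange_one]; omega
    rw [hlen, hd, decide_eq_false hpar]
    have he : zzEntry rows cols s = (zzLo cols s, s - zzLo cols s) := by
      unfold zzEntry; rw [if_neg hpar]
    rw [he, if_neg hpar]
    exact zzDownRun rows cols hr hc s hs0 hsS _ m _ (by omega) le_rfl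

lemma zzMain (rows cols : Int) (hr : 1 ≤ rows) (hc : 1 ≤ cols) :
    ∀ (k : Nat) (s : Int), 0 ≤ s → s ≤ rows + cols - 2 → (rows + cols - 2 - s).toNat = k →
    zzLoop rows cols (zzTail rows cols s).length (zzEntry rows cols s) (decide (s % 2 = 0)) =
      zzTail rows cols s := by
  intro k
  induction k with
  | zero =>
    intro s hs0 hsS hk
    have hS : s = rows + cols - 2 := by omega
    have hsplit : zzTail rows cols s = zzDiag rows cols s ++ zzTail rows cols (s + 1) := by
      unfold zzTail
      rw [PySem.List.pyRange_one_cons (by omega), List.flatMap_cons]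
    have hnil : zzTail rows cols (s + 1) = [] := by
      unfold zzTail
      rw [PySem.List.pyRange_one_eq_nil (by omega)]; rfl
    rw [hsplit, hnil, List.append_nil]
    have hst := zzDiagStep rows cols hr hc s hs0 hsS 0
    rw [Nat.add_zero] at hst
    rw [hst]
    have hz : ∀ (p : Int × Int) (b : Bool), zzLoop rows cols 0 p b = [] := fun _ _ => rfl
    split <;> simp [hz]
  | succ k ih =>
    intro s hs0 hsS hk
    have hsplit : zzTail rows cols s = zzDiag rows cols s ++ zzTail rows cols (s + 1) := by
      unfold zzTail
      rw [PySem.List.pyRange_one_cons (by omega), List.flatMap_cons]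
    rw [hsplit, List.length_append]
    rw [zzDiagStep rows cols hr hc s hs0 hsS _]
    congr 1
    have hrec := ih (s + 1) (by omega) (by omega) (by omega)
    by_cases hpar : s % 2 = 0
    · rw [if_pos hpar]
      have h1 : zzNextUp cols s = zzEntry rows cols (s + 1) := by
        unfold zzNextUp zzEntry zzLo zzHi
        rw [if_neg (by omega : ¬ (s + 1) % 2 = 0)]
        split_ifs with h <;> (simp only [Prod.mk.injEq]; exact ⟨by omega, by omega⟩)
      have h2 : (false : Bool) = decide ((s + 1) % 2 = 0) := by
        rw [decide_eq_false (by omega : ¬ (s + 1) % 2 = 0)]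
      rw [h1, h2, hrec]
    · rw [if_neg hpar]
      have h1 : zzNextDown rows s = zzEntry rows cols (s + 1) := by
        unfold zzNextDown zzEntry zzLo zzHi
        rw [if_pos (by omega : (s + 1) % 2 = 0)]
        split_ifs with h <;> (simp only [Prod.mk.injEq]; exact ⟨by omega, by omega⟩)
      have h2 : (true : Bool) = decide ((s + 1) % 2 = 0) := by
        rw [decide_eq_true (by omega : (s + 1) % 2 = 0)]
      rw [h1, h2, hrec]

lemma zzIndSum (R : Nat) : ∀ n : Nat,
    ((List.range n).map (fun s => if R ≤ s then 1 else 0)).sum = n - R := by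
  intro n
  induction n with
  | zero => simp
  | succ n ih => rw [List.range_succ]; simp [ih]; split <;> omega

lemma zzSumLen (C : Nat) (hC : 1 ≤ C) :
    ∀ R : Nat, 1 ≤ R →
    ((List.range (R + C - 1)).map (fun s => min s (R - 1) + 1 - (s + 1 - C))).sum = R * C := by
  intro R
  induction R with
  | zero => intro h; omega
  | succ R ih =>
    intro _
    by_cases hR0 : R = 0
    · subst hR0
      rw [show 0 + 1 + C - 1 = C from by omega]
      rw [List.map_congr_left (g := fun _ => 1)
        (by intro s hs; simp only [List.mem_range] at hs; beta_reduce; omega)]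
      simp [show 0 + 1 = 1 from rfl, Nat.one_mul]
    · have hR1 : 1 ≤ R := by omega
      rw [show R + 1 + C - 1 = (R + C - 1) + 1 from by omega, List.range_succ,
        List.map_append, List.sum_append]
      rw [List.map_congr_left
        (g := fun s => (min s (R - 1) + 1 - (s + 1 - C)) + (if R ≤ s then 1 else 0))
        (by intro s hs; simp only [List.mem_range] at hs; beta_reduce; split <;> omega)]
      rw [List.sum_map_add, ih hR1, zzIndSum]
      simp only [List.map_cons, List.map_nil, List.sum_cons, List.sum_nil]
      rw [Nat.succ_mul]
      have h1 : min (R + C - 1) (R + 1 - 1) = R := by omega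
      omega

lemma zzLenDiag (rows cols s : Int) (hs0 : 0 ≤ s) :
    (zzDiag rows cols s).length = (min s (rows - 1) - max 0 (s - cols + 1) + 1).toNat := by
  simp only [zzDiag]
  split
  · rw [List.length_map, PySem.List.length_pyRange_neg_one]; omega
  · rw [List.length_map, PySem.List.length_pyRange_one]; omega

lemma zzLenTail (rows cols : Int) (hr : 1 ≤ rows) (hc : 1 ≤ cols) :
    (zzTail rows cols 0).length = (rows * cols).toNat := by
  unfold zzTail
  rw [List.length_flatMap, PySem.List.pyRange_one, List.map_map]
  have hR : ((rows.toNat : Int)) = rows := Int.toNat_of_nonneg (by omega)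
  have hC : ((cols.toNat : Int)) = cols := Int.toNat_of_nonneg (by omega)
  have hn : (rows + cols - 1 - 0).toNat = rows.toNat + cols.toNat - 1 := by omega
  rw [hn]
  rw [List.map_congr_left
    (g := fun k => min k (rows.toNat - 1) + 1 - (k + 1 - cols.toNat))
    (by
      intro k hk
      simp only [Function.comp_apply]
      rw [zzLenDiag rows cols _ (by omega)]
      omega)]
  rw [zzSumLen cols.toNat (by omega) rows.toNat (by omega)]
  have hmul : rows * cols = ((rows.toNat * cols.toNat : Nat) : Int) := by
    rw [Nat.cast_mul, hR, hC]
  rw [hmul, Int.toNat_natCast]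

lemma zzAltTail (rows cols : Int) (hr : 1 ≤ rows) (hc : 1 ≤ cols) :
    zigzag_points_alt rows cols = zzTail rows cols 0 := by
  unfold zigzag_points_alt zzTail
  rw [if_neg (by omega), PySem.List.foldl_append_eq_flatMap, List.nil_append]

lemma zzDegenerate (rows cols : Int) (h : rows ≤ 0 ∨ cols ≤ 0) (hnD : ¬(rows < 0 ∧ cols < 0)) :
    zigzag_points rows cols = [] ∧ zigzag_points_alt rows cols = [] := by
  constructor
  · have hmul : rows * cols ≤ 0 := by
      rcases h with h | h
      · rcases lt_or_ge cols 0 with hcneg | hcpos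
        · have : rows = 0 := by omega
          simp [this]
        · exact mul_nonpos_of_nonpos_of_nonneg h hcpos
      · rcases lt_or_ge rows 0 with hrneg | hrpos
        · have : cols = 0 := by omega
          simp [this]
        · exact mul_nonpos_of_nonneg_of_nonpos hrpos h
    unfold zigzag_points
    rw [show (rows * cols).toNat = 0 from by omega]
    rfl
  · unfold zigzag_points_alt
    rw [if_pos h]

theorem zigzag_points_spec : Claim_unchanged_zigzag_points := by
  intro rows cols _
  unfold Spec_zigzag_points D_zigzag_points
  intro hnD
  by_cases hr : 1 ≤ rows
  · by_cases hc : 1 ≤ cols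
    · have h0 := zzMain rows cols hr hc (rows + cols - 2).toNat 0 le_rfl (by omega) (by omega)
      rw [zzLenTail rows cols hr hc] at h0
      have he : zzEntry rows cols 0 = (0, 0) := by
        unfold zzEntry zzHi
        rw [if_pos (by decide)]
        rw [show min (0 : Int) (rows - 1) = 0 from by omega]
        simp
      rw [he] at h0
      rw [zzAltTail rows cols hr hc]
      exact h0
    · obtain ⟨hA, hB⟩ := zzDegenerate rows cols (Or.inr (by omega)) hnD
      rw [hA, hB]
  · obtain ⟨hA, hB⟩ := zzDegenerate rows cols (Or.inl (by omega)) hnD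
    rw [hA, hB]

theorem zigzag_points_changed : Claim_changed_zigzag_points := by
  unfold Claim_changed_zigzag_points; decide

theorem zigzag_points_tight : Claim_exact_zigzag_points := by
  intro rows cols _ hD
  obtain ⟨hrn, hcn⟩ := hD
  have hpos : 0 < rows * cols := mul_pos_of_neg_of_neg hrn hcn
  have hB : zigzag_points_alt rows cols = [] := by
    unfold zigzag_points_alt
    rw [if_pos (Or.inl (by omega))]
  obtain ⟨n, hn⟩ : ∃ n, (rows * cols).toNat = n + 1 := ⟨(rows * cols).toNat - 1, by omega⟩
  unfold zigzag_points
  rw [hn, hB]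
  simp only [zzLoop]
  exact List.cons_ne_nil _ _
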